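-- pv_equiv track=rewrite | github.com/CamSteph/webscraper-v1 | app/helpers/handle_requests.py | _find_hyperlinks
-- ===== SOURCE A (Python) =====
-- def _find_hyperlinks(response_html) -> list[str]:
--     """Find all <a> tags in the HTTP response data
--
--     Args:
--         response_html (str): The HTML data from the HTTP request
--
--     Returns:
--         list[str]: A list of found <a> tags
--     """
--     response_html = response_html.lower()
--
--     found_hyperlinks = []
--     start = 0
--
--     while True:
--         start_index = response_html.find("<a ", start)
--
--         if start_index == -1:
--             break
--
--         end_index = response_html.find("</a>", start_index)
--
--         if end_index == -1:
--             break
--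
--         end_index += len("</a>")
--
--         hyperlink = response_html[start_index:end_index]
--         found_hyperlinks.append(hyperlink)
--
--         start = end_index
--
--     return found_hyperlinks
-- ===== SOURCE B (Python) =====
-- def _find_hyperlinks(response_html) -> list[str]:
--     """Find all <a> tags in the HTTP response data.
--
--     Close-tag driven: repeatedly cut the (lowercased) HTML at the next
--     "</a>" and, when the chunk before the cut contains "<a ", emit the
--     text from the chunk's first "<a " through that "</a>".
--     """
--     s = response_html.lower()
--     found = []
--
--     while True:
--         j = s.find("</a>")
--         if j == -1:
--             break
--         head = s[:j]
--         i = head.find("<a ")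
--         if i != -1:
--             found.append(head[i:] + "</a>")
--         s = s[j + 4:]
--
--     return found
-- ===== Notes on version B (the rewrite author's own statement) =====
-- stated objective: alternative
-- what changed: A scans open-tag-first with an advancing absolute index (find '<a ' from start, then the next '</a>'); B scans close-tag-first, repeatedly cutting the string at each '</a>' and emitting the chunk from its first '<a ' when the chunk contains one.
import Mathlib
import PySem

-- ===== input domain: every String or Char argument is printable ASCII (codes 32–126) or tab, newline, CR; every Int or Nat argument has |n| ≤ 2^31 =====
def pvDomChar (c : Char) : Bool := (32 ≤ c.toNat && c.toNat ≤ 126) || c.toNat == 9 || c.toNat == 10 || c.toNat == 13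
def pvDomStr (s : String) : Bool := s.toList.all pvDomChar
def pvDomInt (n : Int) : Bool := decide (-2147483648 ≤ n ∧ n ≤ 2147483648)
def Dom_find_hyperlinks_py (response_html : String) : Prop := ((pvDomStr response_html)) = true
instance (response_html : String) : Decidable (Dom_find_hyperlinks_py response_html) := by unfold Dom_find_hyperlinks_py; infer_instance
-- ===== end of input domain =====

-- B replaces A's open-tag-driven pointer loop by a close-tag-driven loop that cuts the
-- string at each "</a>" and keeps the chunks containing "<a " (objective: alternative).

-- ===== PORT A =====
-- "<a " and "</a>" as character lists
def pvTagA : List Char := ['<', 'a', ' ']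
def pvTagC : List Char := ['<', '/', 'a', '>']

-- the `while True` loop of A: state = (start, found_hyperlinks); fuel only makes it total
-- (start grows by ≥ 4 per iteration, so `L.length + 1` fuel is never exhausted)
def pvLoopA (L : List Char) : Nat → Int → List (List Char) → List (List Char)
  | 0, _, acc => acc
  | fuel + 1, start, acc =>
    let start_index := PySem.Chars.findFrom L pvTagA start
    if start_index = -1 then acc
    else
      let end_index := PySem.Chars.findFrom L pvTagC start_index
      if end_index = -1 then acc
      else
        let end_index' := end_index + 4
        let hyperlink := PySem.List.slice L (some start_index) (some end_index')
        pvLoopA L fuel end_index' (acc ++ [hyperlink])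

def find_hyperlinks_py (response_html : String) : List String :=
  let L := PySem.Chars.lower response_html.toList
  (pvLoopA L (L.length + 1) 0 []).map String.ofList

-- ===== PORT B =====
-- B's `while True` loop: state = (remaining suffix s, found); fuel only makes it total
-- (each iteration removes at least 4 characters from s)
def pvGrabB : Nat → List Char → List (List Char) → List (List Char)
  | 0, _, acc => acc
  | fuel + 1, s, acc =>
    let j := PySem.Chars.find s pvTagC
    if j = -1 then acc
    else
      let head := PySem.List.slice s none (some j)
      let i := PySem.Chars.find head pvTagA
      let acc' := if i = -1 then acc
                  else acc ++ [PySem.List.slice head (some i) none ++ pvTagC]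
      pvGrabB fuel (PySem.List.slice s (some (j + 4)) none) acc'

def find_hyperlinks_py_alt (response_html : String) : List String :=
  let L := PySem.Chars.lower response_html.toList
  (pvGrabB (L.length + 1) L []).map String.ofList

-- ===== PRECONDITION & SPEC =====
def Spec_find_hyperlinks_py (response_html : String) (out : List String) : Prop := out = find_hyperlinks_py_alt response_html
instance (response_html : String) (out : List String) : Decidable (Spec_find_hyperlinks_py response_html out) := by unfold Spec_find_hyperlinks_py; infer_instance

-- ===== CLAIM (what is proved, stated in full; the proofs are below) =====
def Claim_equal_find_hyperlinks_py : Prop := ∀ (response_html : String), Dom_find_hyperlinks_py response_html → Spec_find_hyperlinks_py response_html (find_hyperlinks_py response_html)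

-- ===== LEMMAS AND PROOFS =====

-- a prefix of `s.drop m` is an infix of `s`
theorem pv_infix_of_prefix_drop {t s : List Char} {m : Nat} (h : t <+: s.drop m) :
    t <:+: s :=
  h.isInfix.trans (s.drop_suffix m).isInfix

-- characterisation of `find`: first position whose drop has `t` as a prefix
theorem pv_find_eq {s t : List Char} {m : Nat} (h : t <+: s.drop m)
    (hmin : ∀ m' < m, ¬ t <+: s.drop m') : PySem.Chars.find s t = (m : Int) := by
  have hin : t <:+: s := pv_infix_of_prefix_drop h
  have h0 : 0 ≤ PySem.Chars.find s t := (PySem.Chars.find_nonneg_iff s t).2 hin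
  obtain ⟨hpre, hmin'⟩ := PySem.Chars.find_spec h0
  have htn := Int.toNat_of_nonneg h0
  rcases Nat.lt_trichotomy (PySem.Chars.find s t).toNat m with hlt | heq | hgt
  · exact absurd hpre (hmin _ hlt)
  · omega
  · exact absurd h (hmin' m hgt)

-- both tags are prefixes of drops of the same string: equal characters where they overlap
theorem pv_two {S t1 t2 : List Char} {m1 m2 r1 r2 : Nat} (h1 : t1 <+: S.drop m1)
    (h2 : t2 <+: S.drop m2) (hr1 : r1 < t1.length) (hr2 : r2 < t2.length)
    (heq : m1 + r1 = m2 + r2) : t1[r1] = t2[r2] := by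
  have e1 := h1.getElem hr1
  have e2 := h2.getElem hr2
  rw [e1, e2, List.getElem_drop, List.getElem_drop]
  congr 1

-- an infix occurs as a prefix of some drop
theorem pv_prefix_drop_of_infix {t l : List Char} (h : t <:+: l) :
    ∃ m, t <+: l.drop m := by
  obtain ⟨u, v, huv⟩ := h
  exact ⟨u.length, by rw [← huv, List.append_assoc, List.drop_left]; exact ⟨v, rfl⟩⟩

-- prefix inside a take: transfer between `head = s.take j` and `s`
theorem pv_prefix_take_drop {t s : List Char} {m j : Nat} (ht : t ≠ []) :
    t <+: (s.take j).drop m ↔ t <+: s.drop m ∧ m + t.length ≤ j := by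
  have hlen : 0 < t.length := List.length_pos_of_ne_nil ht
  rw [List.drop_take, List.prefix_take_iff]
  constructor
  · rintro ⟨h1, h2⟩; exact ⟨h1, by omega⟩
  · rintro ⟨h1, h2⟩; exact ⟨h1, by omega⟩

-- if the suffix contains no "<a ", B's loop adds nothing
theorem pv_grab_no_open : ∀ (fb : Nat) (s : List Char) (acc : List (List Char)),
    ¬ pvTagA <:+: s → pvGrabB fb s acc = acc := by
  intro fb
  induction fb with
  | zero => intro s acc _; rfl
  | succ f IH =>
    intro s acc hno
    simp only [pvGrabB]
    rcases eq_or_ne (PySem.Chars.find s pvTagC) (-1) with hC | hC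
    · simp [hC]
    · have h0 : 0 ≤ PySem.Chars.find s pvTagC := by
        have := PySem.Chars.neg_one_le_find s pvTagC; omega
      have hheadno : PySem.Chars.find (PySem.List.slice s none (some (PySem.Chars.find s pvTagC))) pvTagA = -1 := by
        rw [PySem.List.slice_to s h0, PySem.Chars.find_eq_neg_one_iff]
        intro hin
        exact hno (hin.trans (List.take_prefix _ s).isInfix)
      have hrest : ¬ pvTagA <:+: PySem.List.slice s (some (PySem.Chars.find s pvTagC + 4)) none := by
        rw [PySem.List.slice_from s (by omega)]
        intro hin
        exact hno (hin.trans (List.drop_suffix _ s).isInfix)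
      simp only [hC, hheadno, reduceIte]
      exact IH _ _ hrest

-- one unfolding of A's loop only looks at `start` through `findFrom`
theorem pv_loopA_start_irrel (L : List Char) (f : Nat) (a b : Int) (acc : List (List Char))
    (h : PySem.Chars.findFrom L pvTagA a = PySem.Chars.findFrom L pvTagA b) :
    pvLoopA L (f + 1) a acc = pvLoopA L (f + 1) b acc := by
  simp only [pvLoopA, h]

-- the core invariant: A's absolute-index loop from `k` equals B's suffix loop on `L.drop k`
theorem pv_core (L : List Char) : ∀ (n fa fb k : Nat) (acc : List (List Char)),
    k ≤ L.length → L.length - k ≤ n → n < fa → n < fb →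
    pvLoopA L fa (k : Int) acc = pvGrabB fb (L.drop k) acc := by
  intro n
  induction n using Nat.strong_induction_on with
  | _ n IH =>
  intro fa fb k acc hk hn hfa hfb
  obtain ⟨fa, rfl⟩ : ∃ m, fa = m + 1 := ⟨fa - 1, by omega⟩
  obtain ⟨fb, rfl⟩ : ∃ m, fb = m + 1 := ⟨fb - 1, by omega⟩
  have hSlen : (L.drop k).length = L.length - k := List.length_drop
  have hfk := PySem.Chars.findFrom_natCast L pvTagA k hk
  rcases eq_or_ne (PySem.Chars.find (L.drop k) pvTagA) (-1) with hA | hA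
  · -- no "<a " in the suffix: A stops at once, B's loop adds nothing
    have hnoA : ¬ pvTagA <:+: L.drop k := (PySem.Chars.find_eq_neg_one_iff _ _).1 hA
    have hsi : PySem.Chars.findFrom L pvTagA (k : Int) = -1 := by rw [hfk, hA]; simp
    rw [pv_grab_no_open _ _ _ hnoA]
    simp [pvLoopA, hsi]
  · have h0A : 0 ≤ PySem.Chars.find (L.drop k) pvTagA := by
      have := PySem.Chars.neg_one_le_find (L.drop k) pvTagA; omega
    set iN := (PySem.Chars.find (L.drop k) pvTagA).toNat with hiN
    have hfindA : PySem.Chars.find (L.drop k) pvTagA = (iN : Int) := by omega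
    obtain ⟨hpreA, hminA⟩ := PySem.Chars.find_spec h0A
    have hiNle : iN ≤ (L.drop k).length := by
      have := PySem.Chars.find_le_length (L.drop k) pvTagA; omega
    have hkin : k + iN ≤ L.length := by omega
    have hsi : PySem.Chars.findFrom L pvTagA (k : Int) = ((k + iN : Nat) : Int) := by
      rw [hfk, hfindA, if_neg (by omega)]; push_cast; ring
    have hfk2 := PySem.Chars.findFrom_natCast L pvTagC (k + iN) hkin
    have hdd : L.drop (k + iN) = (L.drop k).drop iN := by rw [List.drop_drop]
    rcases eq_or_ne (PySem.Chars.find (L.drop k) pvTagC) (-1) with hC | hC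
    · -- an open tag but no close tag anywhere: both stop without output
      have hnoC : ¬ pvTagC <:+: L.drop k := (PySem.Chars.find_eq_neg_one_iff _ _).1 hC
      have hnoC2 : PySem.Chars.find (L.drop (k + iN)) pvTagC = -1 := by
        rw [PySem.Chars.find_eq_neg_one_iff, hdd]
        intro hin
        exact hnoC (hin.trans (List.drop_suffix iN (L.drop k)).isInfix)
      have hei : PySem.Chars.findFrom L pvTagC ((k + iN : Nat) : Int) = -1 := by
        rw [hfk2, hnoC2]; simp
      simp only [pvLoopA, pvGrabB, hsi, hei, hC, reduceIte]
      rfl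
    · have h0C : 0 ≤ PySem.Chars.find (L.drop k) pvTagC := by
        have := PySem.Chars.neg_one_le_find (L.drop k) pvTagC; omega
      set jN := (PySem.Chars.find (L.drop k) pvTagC).toNat with hjN
      have hfindC : PySem.Chars.find (L.drop k) pvTagC = (jN : Int) := by omega
      obtain ⟨hpreC, hminC⟩ := PySem.Chars.find_spec h0C
      have hjN4 : jN + 4 ≤ (L.drop k).length := by
        have h1 := hpreC.length_le
        rw [List.length_drop] at h1
        have h2 : pvTagC.length = 4 := rfl
        omega
      -- the two tags cannot overlap: either the open tag ends before the close tag
      -- starts, or it starts after the close tag ends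
      have hsep : iN + 3 ≤ jN ∨ jN + 4 ≤ iN := by
        by_contra hcon
        rw [not_or] at hcon
        rw [Nat.not_le, Nat.not_le] at hcon
        obtain ⟨hc1, hc2⟩ := hcon
        have hcases : iN = jN ∨ jN = iN + 1 ∨ jN = iN + 2 ∨ iN = jN + 1 ∨ iN = jN + 2 ∨ iN = jN + 3 := by
          omega
        rcases hcases with h | h | h | h | h | h
        · have := pv_two hpreA hpreC (r1 := 1) (r2 := 1) (by decide) (by decide) (by omega)
          exact absurd this (by decide)
        · have := pv_two hpreA hpreC (r1 := 1) (r2 := 0) (by decide) (by decide) (by omega)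
          exact absurd this (by decide)
        · have := pv_two hpreA hpreC (r1 := 2) (r2 := 0) (by decide) (by decide) (by omega)
          exact absurd this (by decide)
        · have := pv_two hpreA hpreC (r1 := 0) (r2 := 1) (by decide) (by decide) (by omega)
          exact absurd this (by decide)
        · have := pv_two hpreA hpreC (r1 := 0) (r2 := 2) (by decide) (by decide) (by omega)
          exact absurd this (by decide)
        · have := pv_two hpreA hpreC (r1 := 0) (r2 := 3) (by decide) (by decide) (by omega)
          exact absurd this (by decide)
      have hrest : PySem.List.slice (L.drop k) (some ((jN : Int) + 4)) none = L.drop (k + (jN + 4)) := by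
        rw [show ((jN : Int) + 4) = ((jN + 4 : Nat) : Int) from by push_cast; ring,
          PySem.List.slice_from _ (by omega), Int.toNat_natCast, List.drop_drop]
      have hhead : PySem.List.slice (L.drop k) none (some (jN : Int)) = (L.drop k).take jN := by
        rw [PySem.List.slice_to _ (by omega), Int.toNat_natCast]
      rcases hsep with hlt | hgt
      · -- the first "<a " comes before the first "</a>": both emit the same link
        have hheadfind : PySem.Chars.find ((L.drop k).take jN) pvTagA = (iN : Int) := by
          apply pv_find_eq
          · exact (pv_prefix_take_drop (by decide)).2 ⟨hpreA, by simp [pvTagA]; omega⟩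
          · intro m' hm' hpre'
            exact hminA m' hm' ((pv_prefix_take_drop (by decide)).1 hpre').1
        have hfindC2 : PySem.Chars.find (L.drop (k + iN)) pvTagC = ((jN - iN : Nat) : Int) := by
          apply pv_find_eq
          · rw [hdd, List.drop_drop, show iN + (jN - iN) = jN from by omega]
            exact hpreC
          · intro m' hm' hpre'
            rw [hdd, List.drop_drop] at hpre'
            exact hminC (iN + m') (by omega) hpre'
        have hei : PySem.Chars.findFrom L pvTagC ((k + iN : Nat) : Int) = ((k + jN : Nat) : Int) := by
          rw [hfk2, hfindC2, if_neg (by omega)]; push_cast; omega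
        have hslice : PySem.List.slice L (some ((k + iN : Nat) : Int)) (some (((k + jN : Nat) : Int) + 4)) =
            ((L.drop k).take jN).drop iN ++ pvTagC := by
          rw [show (((k + jN : Nat) : Int) + 4) = ((k + jN + 4 : Nat) : Int) from by push_cast; ring,
            PySem.List.slice_natCast, show k + jN + 4 - (k + iN) = (jN - iN) + 4 from by omega,
            List.take_add]
          congr 1
          · rw [List.drop_take, ← List.drop_drop]
          · rw [List.drop_drop, show k + iN + (jN - iN) = k + jN from by omega, ← List.drop_drop]
            exact (List.prefix_iff_eq_take.1 hpreC).symm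
        have hIH := IH (n - (jN + 4)) (by omega) fa fb (k + (jN + 4))
          (acc ++ [((L.drop k).take jN).drop iN ++ pvTagC]) (by omega) (by omega) (by omega) (by omega)
        simp only [pvLoopA, pvGrabB, hsi, hei, hfindC, hhead, hheadfind, hrest, hslice]
        rw [if_neg (by omega), if_neg (by omega), if_neg (by omega), if_neg (by omega),
          show (((k + jN : Nat) : Int) + 4) = ((k + (jN + 4) : Nat) : Int) from by push_cast; ring,
          PySem.List.slice_from _ (by omega), Int.toNat_natCast]
        exact hIH
      · -- the first "</a>" comes before the first "<a ": B drops a linkless chunk,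
        -- A's search is unaffected (its next open tag lies beyond that "</a>")
        have hk4 : k + (jN + 4) ≤ L.length := by omega
        have hheadno : PySem.Chars.find ((L.drop k).take jN) pvTagA = -1 := by
          rw [PySem.Chars.find_eq_neg_one_iff]
          intro hin
          obtain ⟨m, hm⟩ := pv_prefix_drop_of_infix hin
          obtain ⟨hpre', hlen'⟩ := (pv_prefix_take_drop (by decide)).1 hm
          exact hminA m (by simp [pvTagA] at hlen'; omega) hpre'
        have hstart2 : PySem.Chars.findFrom L pvTagA ((k + (jN + 4) : Nat) : Int) =
            PySem.Chars.findFrom L pvTagA (k : Int) := by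
          rw [hsi, PySem.Chars.findFrom_natCast L pvTagA _ hk4]
          have hfind3 : PySem.Chars.find (L.drop (k + (jN + 4))) pvTagA = ((iN - (jN + 4) : Nat) : Int) := by
            apply pv_find_eq
            · rw [List.drop_drop, show k + (jN + 4) + (iN - (jN + 4)) = k + iN from by omega, ← List.drop_drop]
              exact hpreA
            · intro m' hm' hpre'
              rw [List.drop_drop] at hpre'
              apply hminA (jN + 4 + m') (by omega)
              rw [List.drop_drop, show k + (jN + 4 + m') = k + (jN + 4) + m' from by omega]
              exact hpre'
          rw [hfind3, if_neg (by omega)]; push_cast; omega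
        rw [← pv_loopA_start_irrel L fa _ _ acc hstart2]
        have hIH := IH (n - (jN + 4)) (by omega) (fa + 1) fb (k + (jN + 4)) acc
          (by omega) (by omega) (by omega) (by omega)
        rw [hIH]
        simp only [pvGrabB, hfindC, hhead, hheadno, hrest, reduceIte]
        rw [if_neg (by omega)]

-- ===== VERDICT (by name: the statement is the Claim_ definition above) =====
theorem find_hyperlinks_py_spec : Claim_equal_find_hyperlinks_py := by
  intro s _
  show _ = _
  unfold find_hyperlinks_py find_hyperlinks_py_alt
  have h := pv_core (PySem.Chars.lower s.toList) (PySem.Chars.lower s.toList).length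
    ((PySem.Chars.lower s.toList).length + 1) ((PySem.Chars.lower s.toList).length + 1)
    0 [] (by omega) (by omega) (by omega) (by omega)
  simp only [List.drop_zero, Nat.cast_zero] at h
  exact congrArg (List.map String.ofList) h
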